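-- pv_equiv track=rewrite | github.com/Iamnvincible/Duolingo-Notes | src/parse_vocabulary.py | split_word_by_skill
-- ===== SOURCE A (Python) =====
-- def split_word_by_skill(vocab_overview: list):
--     """
--     将单词按 skill 组织
--     """
--     word_skills = {}
--     for word in vocab_overview:
--         skill = word["skill_url_title"]
--         if skill not in word_skills.keys():
--             word_skills[skill] = []
--         word_skills[skill].append(word)
--     return word_skills
-- ===== SOURCE B (Python) =====
-- def split_word_by_skill(vocab_overview: list):
--     """
--     将单词按 skill 组织
--     """
--     skills = []
--     for word in vocab_overview:
--         skill = word["skill_url_title"]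
--         if skill not in skills:
--             skills.append(skill)
--     return {skill: [w for w in vocab_overview if w["skill_url_title"] == skill]
--             for skill in skills}
-- ===== Notes on version B (the rewrite author's own statement) =====
-- stated objective: alternative
-- what changed: A builds the groups incrementally in one pass by appending each word to a mutable per-skill list; B first collects the distinct skills in order of first occurrence and then builds each group with a separate filtering pass over the whole input (a dict comprehension), trading O(n) for O(n*k) but with no mutable dict state.
import Mathlib
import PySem

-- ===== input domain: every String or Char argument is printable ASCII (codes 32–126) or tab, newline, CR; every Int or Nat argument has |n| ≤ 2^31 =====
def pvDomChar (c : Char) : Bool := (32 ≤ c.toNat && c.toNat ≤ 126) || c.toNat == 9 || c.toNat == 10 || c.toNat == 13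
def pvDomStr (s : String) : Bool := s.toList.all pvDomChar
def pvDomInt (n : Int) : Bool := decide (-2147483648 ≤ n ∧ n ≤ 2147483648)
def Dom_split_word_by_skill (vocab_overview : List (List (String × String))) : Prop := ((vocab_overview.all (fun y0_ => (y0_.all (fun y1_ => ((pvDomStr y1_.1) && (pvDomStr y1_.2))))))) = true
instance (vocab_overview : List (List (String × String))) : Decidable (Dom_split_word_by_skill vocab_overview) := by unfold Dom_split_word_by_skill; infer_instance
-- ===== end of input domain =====

-- B groups by a first-occurrence skill list plus one filtering pass per skill instead of A's
-- incremental mutable dict; same return value, no speed claim.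

-- word["skill_url_title"] — none is exactly Python's KeyError (excluded by Pre_)
def skillKey (w : List (String × String)) : Option String :=
  (PySem.Dict.mk w).get? "skill_url_title"

-- ===== PORT A =====
def split_word_by_skill (vocab_overview : List (List (String × String))) : List (String × List (List (String × String))) :=
  (vocab_overview.foldl (fun word_skills word =>
      match skillKey word with
      | none => word_skills   -- KeyError in Python: outside Pre_
      | some skill =>
        let word_skills :=
          if word_skills.contains skill then word_skills
          else word_skills.insert skill []
        word_skills.modify skill [] (fun l => l ++ [word]))
    PySem.Dict.empty).items

-- ===== PORT B =====
def split_word_by_skill_alt (vocab_overview : List (List (String × String))) : List (String × List (List (String × String))) :=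
  let skills := vocab_overview.foldl (fun ks word =>
      match skillKey word with
      | none => ks            -- KeyError in Python: outside Pre_
      | some skill => if skill ∈ ks then ks else ks ++ [skill]) []
  skills.map (fun skill =>
    (skill, vocab_overview.filter (fun w => skillKey w == some skill)))

-- ===== PRECONDITION & SPEC =====
-- Pre_: every word has the key "skill_url_title"; on any other input Python A raises KeyError.
def Pre_split_word_by_skill (vocab_overview : List (List (String × String))) : Prop :=
  ∀ w ∈ vocab_overview, (skillKey w).isSome
instance (vocab_overview : List (List (String × String))) : Decidable (Pre_split_word_by_skill vocab_overview) := by unfold Pre_split_word_by_skill; infer_instance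
def pvWitness_split_word_by_skill : (List (List (String × String))) :=
  [[("skill_url_title", "s1"), ("word", "hi")], [("skill_url_title", "s2")], [("skill_url_title", "s1"), ("word", "ok")]]

def Spec_split_word_by_skill (vocab_overview : List (List (String × String))) (out : List (String × List (List (String × String)))) : Prop := out = split_word_by_skill_alt vocab_overview
instance (vocab_overview : List (List (String × String))) (out : List (String × List (List (String × String)))) : Decidable (Spec_split_word_by_skill vocab_overview out) := by unfold Spec_split_word_by_skill; infer_instance

-- ===== CLAIM (what is proved, stated in full; the proofs are below) =====
def Claim_equal_split_word_by_skill : Prop := ∀ (vocab_overview : List (List (String × String))), Dom_split_word_by_skill vocab_overview → Pre_split_word_by_skill vocab_overview → Spec_split_word_by_skill vocab_overview (split_word_by_skill vocab_overview)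

-- ===== LEMMAS AND PROOFS =====

-- A's loop body (ensure-key-then-append) is exactly one Dict.modify.
lemma stepA_eq_modify (d : PySem.Dict String (List (List (String × String)))) (k : String)
    (w : List (String × String)) :
    (if d.contains k then d else d.insert k []).modify k [] (fun l => l ++ [w])
      = d.modify k [] (fun l => l ++ [w]) := by
  by_cases h : d.contains k
  · simp [h]
  · simp only [h, if_neg, Bool.not_eq_true, PySem.Dict.modify, PySem.Dict.insert_insert_self,
      PySem.Dict.getD_insert_self]
    rw [PySem.Dict.getD_of_not_contains d [] (by simpa using h)]

def stepM (d : PySem.Dict String (List (List (String × String)))) (w : List (String × String)) :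
    PySem.Dict String (List (List (String × String))) :=
  match skillKey w with
  | none => d
  | some skill => d.modify skill [] (fun l => l ++ [w])

def stepK (ks : List String) (w : List (String × String)) : List String :=
  match skillKey w with
  | none => ks
  | some skill => if skill ∈ ks then ks else ks ++ [skill]

lemma foldA_eq_foldM (v : List (List (String × String)))
    (d : PySem.Dict String (List (List (String × String)))) :
    v.foldl (fun word_skills word =>
      match skillKey word with
      | none => word_skills
      | some skill =>
        let word_skills :=
          if word_skills.contains skill then word_skills
          else word_skills.insert skill []
        word_skills.modify skill [] (fun l => l ++ [word])) d
      = v.foldl stepM d := by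
  apply PySem.List.foldl_congr_mem
  intro acc w _
  cases h : skillKey w with
  | none => simp [stepM, h]
  | some k => simp only [stepM, h, stepA_eq_modify]

lemma keys_foldM (v : List (List (String × String)))
    (d : PySem.Dict String (List (List (String × String)))) :
    (v.foldl stepM d).keys = v.foldl stepK d.keys := by
  induction v generalizing d with
  | nil => rfl
  | cons w t ih =>
    simp only [List.foldl_cons, ih]
    congr 1
    cases h : skillKey w with
    | none => simp [stepM, stepK, h]
    | some k =>
      simp only [stepM, stepK, h, PySem.Dict.keys_modify]
      by_cases hk : k ∈ d.keys
      · rw [PySem.Dict.keys_insert_of_contains]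
        · simp [hk]
        · rw [PySem.Dict.contains_eq_decide_mem_keys]; simpa using hk
      · rw [PySem.Dict.keys_insert_of_not_contains]
        · simp [hk]
        · rw [PySem.Dict.contains_eq_decide_mem_keys]; simpa using hk

lemma getD_foldM (v : List (List (String × String)))
    (d : PySem.Dict String (List (List (String × String)))) (c : String) :
    (v.foldl stepM d).getD c [] = d.getD c [] ++ v.filter (fun w => skillKey w == some c) := by
  induction v generalizing d with
  | nil => simp
  | cons w t ih =>
    simp only [List.foldl_cons, List.filter_cons, ih]
    cases h : skillKey w with
    | none => simp [stepM, h]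
    | some k =>
      simp only [stepM, h]
      by_cases hc : c = k
      · subst hc
        rw [PySem.Dict.getD_modify]
        simp
      · rw [PySem.Dict.getD_modify, if_neg hc]
        simp [show ¬k = c from fun e => hc e.symm]

lemma nodup_foldK (v : List (List (String × String))) (ks : List String) (h : ks.Nodup) :
    (v.foldl stepK ks).Nodup := by
  induction v generalizing ks with
  | nil => exact h
  | cons w t ih =>
    apply ih
    cases hw : skillKey w with
    | none => simpa [stepK, hw] using h
    | some k =>
      simp only [stepK, hw]
      by_cases hk : k ∈ ks
      · simpa [hk] using h
      · simp only [hk, if_neg, not_false_iff]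
        exact List.Nodup.append h (List.nodup_singleton k) (by simpa using hk)

-- ===== VERDICT (by name: the statement is the Claim_ definition above) =====
theorem split_word_by_skill_spec : Claim_equal_split_word_by_skill := by
  intro v _ _
  unfold Spec_split_word_by_skill split_word_by_skill split_word_by_skill_alt
  rw [foldA_eq_foldM]
  rw [PySem.Dict.items_eq_map_keys _ (by rw [keys_foldM]; exact nodup_foldK v _ List.nodup_nil) []]
  rw [keys_foldM]
  simp only [PySem.Dict.keys_empty]
  apply List.map_congr_left
  intro k _
  rw [getD_foldM]
  simp
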